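-- pv_equiv track=rewrite | github.com/rahulrishi01/Data-Structure | python/DynamicProgramming/minimum_subset_sum_diff.py | solve_subset_sum
-- ===== SOURCE A (Python) =====
-- def solve_subset_sum(arr, sum, n):
--     s_s_metrix = [[False for x in range(sum+1)] for y in range(n+1)]
--     for i in range(n+1):
--         s_s_metrix[i][0] = True
--     for i in range(1, n+1):
--         for j in range(1, sum+1):
--             if arr[i-1] <= j:
--                 s_s_metrix[i][j] = s_s_metrix[i-1][j] or s_s_metrix[i-1][j - arr[i-1]]
--             else:
--                 s_s_metrix[i][j] = s_s_metrix[i-1][j]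
--     return s_s_metrix
-- ===== SOURCE B (Python) =====
-- def solve_subset_sum(arr, sum, n):
--     rows = []
--     reach = {0}
--     for i in range(n + 1):
--         if i > 0:
--             a = arr[i - 1]
--             reach = reach | {s + a for s in reach if 0 <= s + a <= sum}
--         rows.append([j in reach for j in range(sum + 1)])
--     return rows
-- ===== Notes on version B (the rewrite author's own statement) =====
-- stated objective: alternative
-- what changed: B replaces the (n+1)x(sum+1) boolean DP table with back-references into the previous row by a running set of reachable subset sums, unioning in shifted copies and emitting each row as a membership test.
-- outside the precondition, e.g. on solve_subset_sum([], 0, 1): A returns [[True], [True]], B raises IndexError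
import Mathlib
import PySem

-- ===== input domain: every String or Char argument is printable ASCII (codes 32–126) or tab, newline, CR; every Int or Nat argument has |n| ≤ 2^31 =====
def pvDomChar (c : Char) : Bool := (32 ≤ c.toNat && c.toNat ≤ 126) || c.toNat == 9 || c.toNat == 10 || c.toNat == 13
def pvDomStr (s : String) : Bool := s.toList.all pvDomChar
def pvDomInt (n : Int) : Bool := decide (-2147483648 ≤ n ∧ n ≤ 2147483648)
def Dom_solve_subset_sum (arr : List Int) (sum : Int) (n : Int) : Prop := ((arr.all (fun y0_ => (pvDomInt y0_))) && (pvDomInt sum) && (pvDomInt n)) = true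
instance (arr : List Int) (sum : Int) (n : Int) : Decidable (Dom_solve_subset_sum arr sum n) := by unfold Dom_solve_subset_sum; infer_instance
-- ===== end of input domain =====

-- B replaces the row-by-row boolean DP table scan with a running set of reachable sums (objective: alternative/idiomatic).

-- ===== PORT A =====
-- literal transliteration of A: build (n+1)×(sum+1) False matrix, set column 0 True,
-- then fill each cell from the previous row (pyGetD/pySetD defaults never fire inside Pre_).
def solve_subset_sum (arr : List Int) (sum : Int) (n : Int) : List (List Bool) :=
  let m0 : List (List Bool) :=
    (PySem.List.pyRange 0 (n+1) 1).map (fun _y => (PySem.List.pyRange 0 (sum+1) 1).map (fun _x => false))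
  let m1 : List (List Bool) :=
    (PySem.List.pyRange 0 (n+1) 1).foldl
      (fun m i => PySem.List.pySetD m i (PySem.List.pySetD (PySem.List.pyGetD m i []) 0 true)) m0
  (PySem.List.pyRange 1 (n+1) 1).foldl
    (fun m i =>
      (PySem.List.pyRange 1 (sum+1) 1).foldl
        (fun m j =>
          let prev := PySem.List.pyGetD m (i-1) []
          let v :=
            if PySem.List.pyGetD arr (i-1) 0 ≤ j then
              PySem.List.pyGetD prev j false ||
                PySem.List.pyGetD prev (j - PySem.List.pyGetD arr (i-1) 0) false
            else
              PySem.List.pyGetD prev j false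
          PySem.List.pySetD m i (PySem.List.pySetD (PySem.List.pyGetD m i []) j v)) m) m1

-- ===== PORT B =====
-- literal transliteration of B (Source B): running set `reach` of reachable sums, one row emitted per i.
def solve_subset_sum_alt (arr : List Int) (sum : Int) (n : Int) : List (List Bool) :=
  ((PySem.List.pyRange 0 (n+1) 1).foldl
    (fun (st : List (List Bool) × PySem.Set Int) i =>
      let reach :=
        if i > 0 then
          let a := PySem.List.pyGetD arr (i-1) 0
          PySem.Set.union st.2 ((st.2.filter (fun s => 0 ≤ s + a ∧ s + a ≤ sum)).map (fun s => s + a))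
        else st.2
      (st.1 ++ [(PySem.List.pyRange 0 (sum+1) 1).map (fun j => PySem.Set.contains reach j)], reach))
    ([], PySem.Set.ofList [0])).1

-- ===== PRECONDITION & SPEC =====
-- Pre_ excludes the inputs outside the function's natural domain: n ≥ 0 with sum < 0 and
-- (sum ≥ 1 with n > len(arr)) make A raise IndexError; sum = 0 with n > len(arr) makes A
-- return [True]-rows without ever reading arr while B's natural indexing raises (cited);
-- a negative element among arr[:n] with sum ≥ 1 makes A's back-reference j-arr[i-1] run
-- off the table, raising IndexError except when the or-short-circuit skips it (cited).
def Pre_solve_subset_sum (arr : List Int) (sum : Int) (n : Int) : Prop :=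
  n < 0 ∨ (0 ≤ sum ∧ 0 ≤ n ∧ n ≤ arr.length ∧
    (sum = 0 ∨ ∀ a ∈ arr.take n.toNat, 0 ≤ a))
instance (arr : List Int) (sum : Int) (n : Int) : Decidable (Pre_solve_subset_sum arr sum n) := by
  unfold Pre_solve_subset_sum; infer_instance

def pvWitness_solve_subset_sum : List Int × Int × Int := ([3, 1, 4, 2], 7, 4)

def Spec_solve_subset_sum (arr : List Int) (sum : Int) (n : Int) (out : List (List Bool)) : Prop := out = solve_subset_sum_alt arr sum n
instance (arr : List Int) (sum : Int) (n : Int) (out : List (List Bool)) : Decidable (Spec_solve_subset_sum arr sum n out) := by unfold Spec_solve_subset_sum; infer_instance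

-- ===== CLAIM (what is proved, stated in full; the proofs are below) =====
def Claim_equal_solve_subset_sum : Prop := ∀ (arr : List Int) (sum : Int) (n : Int), Dom_solve_subset_sum arr sum n → Pre_solve_subset_sum arr sum n → Spec_solve_subset_sum arr sum n (solve_subset_sum arr sum n)

-- ===== LEMMAS AND PROOFS =====

-- B's membership function: chi arr sum i j = "j is in reach after i elements".
def chi (arr : List Int) (sum : Int) : Nat → Int → Bool
  | 0, j => j == 0
  | i+1, j => chi arr sum i j || (decide (0 ≤ j ∧ j ≤ sum) && chi arr sum i (j - arr.getD i 0))

-- A's cell recurrence (column 0 preset to True).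
def chiA (arr : List Int) (sum : Int) : Nat → Int → Bool
  | 0, j => j == 0
  | i+1, j =>
    if j == 0 then true
    else if arr.getD i 0 ≤ j then chiA arr sum i j || chiA arr sum i (j - arr.getD i 0)
    else chiA arr sum i j

theorem chi_zero (arr : List Int) (sum : Int) (i : Nat) : chi arr sum i 0 = true := by
  induction i with
  | zero => simp [chi]
  | succ i ih => simp [chi, ih]

theorem chi_nonneg (arr : List Int) (sum : Int) (i : Nat)
    (h : ∀ k < i, 0 ≤ arr.getD k 0) (x : Int) (hx : chi arr sum i x = true) : 0 ≤ x := by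
  induction i generalizing x with
  | zero => simp [chi] at hx; omega
  | succ i ih =>
    simp only [chi, Bool.or_eq_true, Bool.and_eq_true, decide_eq_true_eq,
      List.getD_eq_getElem?_getD] at hx
    rcases hx with hx | ⟨⟨hx0, -⟩, hx⟩
    · exact ih (fun k hk => h k (by omega)) x hx
    · omega

theorem chiA_eq_chi (arr : List Int) (sum : Int) (i : Nat)
    (hnn : ∀ k < i, 0 ≤ arr.getD k 0) (j : Int) (h0 : 0 ≤ j) (hs : j ≤ sum) :
    chiA arr sum i j = chi arr sum i j := by
  induction i generalizing j with
  | zero => rfl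
  | succ i ih =>
    have hnn' : ∀ k < i, 0 ≤ arr.getD k 0 := fun k hk => hnn k (by omega)
    have ha := hnn i (by omega)
    by_cases hj : j = 0
    · subst hj
      simp [chiA, chi_zero]
    · have hcond : ¬ ((j == 0) = true) := by simp [hj]
      rw [show chiA arr sum (i+1) j =
            (if (j == 0) = true then true
             else if arr.getD i 0 ≤ j then chiA arr sum i j || chiA arr sum i (j - arr.getD i 0)
             else chiA arr sum i j) from rfl,
          if_neg hcond,
          show chi arr sum (i+1) j =
            (chi arr sum i j || (decide (0 ≤ j ∧ j ≤ sum) && chi arr sum i (j - arr.getD i 0))) from rfl,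
          decide_eq_true (show 0 ≤ j ∧ j ≤ sum from ⟨h0, hs⟩), Bool.true_and]
      by_cases hle : arr.getD i 0 ≤ j
      · rw [if_pos hle, ih hnn' j h0 hs, ih hnn' (j - arr.getD i 0) (by omega) (by omega)]
      · rw [if_neg hle, ih hnn' j h0 hs]
        have hf : chi arr sum i (j - arr.getD i 0) = false := by
          cases hcf : chi arr sum i (j - arr.getD i 0) with
          | false => rfl
          | true => exact absurd (chi_nonneg arr sum i hnn' _ hcf) (by omega)
        rw [hf, Bool.or_false]

-- sum = 0: every chi/chiA value at column 0 is true (the only column).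
theorem chiA_eq_chi_sum0 (arr : List Int) (i : Nat) :
    chiA arr 0 i 0 = chi arr 0 i 0 := by
  cases i with
  | zero => rfl
  | succ i => simp [chiA, chi_zero]


-- ---- B side ----

theorem bool_of_iff {a b : Bool} (h : a = true ↔ b = true) : a = b := by
  cases a <;> cases b <;> simp_all

theorem alt_fold (arr : List Int) (S : Nat) (k : Nat) :
    ∃ r : PySem.Set Int,
      ((PySem.List.pyRange 0 ((k:Int)+1) 1).foldl
        (fun (st : List (List Bool) × PySem.Set Int) i =>
          let reach :=
            if i > 0 then
              let a := PySem.List.pyGetD arr (i-1) 0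
              PySem.Set.union st.2 ((st.2.filter (fun s => 0 ≤ s + a ∧ s + a ≤ (S:Int))).map (fun s => s + a))
            else st.2
          (st.1 ++ [(PySem.List.pyRange 0 ((S:Int)+1) 1).map (fun j => PySem.Set.contains reach j)], reach))
        ([], PySem.Set.ofList [0]))
      = ((List.range (k+1)).map
          (fun i => (List.range (S+1)).map (fun c : Nat => chi arr (S:Int) i (c:Int))), r)
      ∧ (∀ x : Int, x ∈ r ↔ chi arr (S:Int) k x = true) := by
  induction k with
  | zero =>
    refine ⟨PySem.Set.ofList [0], ?_, ?_⟩
    · rw [show ((0:Nat):Int) + 1 = 0 + 1 by omega, PySem.List.pyRange_one_singleton]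
      simp only [List.foldl_cons, List.foldl_nil]
      rw [if_neg (by omega)]
      refine Prod.ext ?_ rfl
      show [_] = [_]
      rw [show ((S:Int)+1) = ((S+1:Nat):Int) by push_cast; ring,
        PySem.List.pyRange_zero_natCast, List.map_map]
      refine congrArg (fun l => [l]) (List.map_congr_left fun c _ => ?_)
      refine bool_of_iff ?_
      show PySem.Set.contains _ _ = true ↔ _
      rw [PySem.Set.contains_iff, PySem.Set.mem_ofList]
      simp [chi]
    · intro x
      rw [PySem.Set.mem_ofList]
      simp [chi]
  | succ k ih =>
    obtain ⟨r, hfold, hmem⟩ := ih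
    have ha : PySem.List.pyGetD arr (((k:Nat):Int)+1-1) 0 = arr.getD k 0 := by
      rw [show ((k:Nat):Int)+1-1 = ((k:Nat):Int) by omega, PySem.List.pyGetD_natCast]
    have hmem' : ∀ x : Int,
        x ∈ PySem.Set.union r
          ((r.filter (fun s => 0 ≤ s + arr.getD k 0 ∧ s + arr.getD k 0 ≤ (S:Int))).map (fun s => s + arr.getD k 0))
        ↔ chi arr (S:Int) (k+1) x = true := by
      intro x
      rw [PySem.Set.mem_union]
      show _ ↔ (chi arr (S:Int) k x ||
        (decide (0 ≤ x ∧ x ≤ (S:Int)) && chi arr (S:Int) k (x - arr.getD k 0))) = true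
      simp only [List.mem_map, List.mem_filter, decide_eq_true_eq, Bool.or_eq_true,
        Bool.and_eq_true, hmem]
      constructor
      · rintro (h | ⟨s, ⟨hs, hle⟩, rfl⟩)
        · exact Or.inl h
        · exact Or.inr ⟨by simpa using hle, by simpa using hs⟩
      · rintro (h | ⟨⟨hle0, hle⟩, h⟩)
        · exact Or.inl h
        · exact Or.inr ⟨x - arr.getD k 0, ⟨h, by omega⟩, by omega⟩
    refine ⟨PySem.Set.union r
        ((r.filter (fun s => 0 ≤ s + arr.getD k 0 ∧ s + arr.getD k 0 ≤ (S:Int))).map (fun s => s + arr.getD k 0)),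
      ?_, hmem'⟩
    rw [show ((k+1:Nat):Int) + 1 = ((k:Nat):Int) + 1 + 1 by push_cast; omega,
      show PySem.List.pyRange 0 (((k:Nat):Int)+1+1) 1
          = PySem.List.pyRange 0 (((k:Nat):Int)+1) 1 ++ [((k:Nat):Int)+1] from
        PySem.List.pyRange_one_succ_right (by omega),
      List.foldl_append, hfold]
    simp only [List.foldl_cons, List.foldl_nil]
    rw [if_pos (by omega), ha]
    refine Prod.ext ?_ rfl
    show _ ++ [_] = _
    rw [show List.range (k+1+1) = List.range (k+1) ++ [k+1] from List.range_succ,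
      List.map_append, List.map_singleton]
    refine congrArg _ (congrArg (fun l => [l]) ?_)
    rw [show ((S:Int)+1) = ((S+1:Nat):Int) by push_cast; ring,
      PySem.List.pyRange_zero_natCast, List.map_map]
    refine List.map_congr_left fun c _ => ?_
    refine bool_of_iff ?_
    show PySem.Set.contains _ _ = true ↔ _
    rw [PySem.Set.contains_iff, hmem' _]

theorem alt_closed (arr : List Int) (S N : Nat) :
    solve_subset_sum_alt arr (S:Int) (N:Int) =
      (List.range (N+1)).map
        (fun i => (List.range (S+1)).map (fun c : Nat => chi arr (S:Int) i (c:Int))) := by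
  obtain ⟨r, hfold, -⟩ := alt_fold arr S N
  unfold solve_subset_sum_alt
  rw [hfold]


-- ---- A side ----

def rowI (S : Nat) : List Bool := true :: List.replicate S false

def rowTA (arr : List Int) (S : Nat) (i : Nat) : List Bool :=
  (List.range (S+1)).map (fun c : Nat => chiA arr (S:Int) i (c:Int))

def prow (arr : List Int) (S : Nat) (i : Nat) (t : Nat) : List Bool :=
  (List.range (S+1)).map (fun c : Nat => if c ≤ t then chiA arr (S:Int) i (c:Int) else false)

theorem chiA_zero (arr : List Int) (sum : Int) (i : Nat) : chiA arr sum i 0 = true := by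
  cases i with
  | zero => rfl
  | succ i => rfl

theorem getD_map_range_lt {α : Type} (f : Nat → α) (L m : Nat) (d : α) (h : m < L) :
    ((List.range L).map f).getD m d = f m := by
  simp [List.getD, h]

theorem getD_append_lt {α : Type} (l r : List α) (d : α) (m : Nat) (h : m < l.length) :
    (l ++ r).getD m d = l.getD m d := by
  simp [List.getD, List.getElem?_append_left h]

theorem getD_append_len {α : Type} (l r : List α) (d : α) :
    (l ++ r).getD l.length d = r.getD 0 d := by
  simp [List.getD, List.getElem?_append_right (le_refl _)]

theorem set_append_len {α : Type} (l r : List α) (v : α) :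
    (l ++ r).set l.length v = l ++ r.set 0 v := by
  rw [List.set_append_right _ _ (le_refl _)]
  simp

theorem getD_append_at {α : Type} (l r : List α) (d : α) (m : Nat) (h : l.length = m) :
    (l ++ r).getD m d = r.getD 0 d := by subst h; exact getD_append_len l r d

theorem set_append_at {α : Type} (l r : List α) (v : α) (m : Nat) (h : l.length = m) :
    (l ++ r).set m v = l ++ r.set 0 v := by subst h; exact set_append_len l r v

theorem set_map_range {α : Type} (f : Nat → α) (L m : Nat) (v : α) (_h : m < L) :
    ((List.range L).map f).set m v = (List.range L).map (fun c => if c = m then v else f c) := by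
  apply List.ext_getElem
  · simp
  · intro i h1 h2
    simp only [List.getElem_set, List.getElem_map, List.getElem_range] at *
    split_ifs with h3 h4 h4
    · rfl
    · exact absurd h3.symm h4
    · exact absurd h4.symm h3
    · rfl

theorem rowTA_zero (arr : List Int) (S : Nat) : rowTA arr S 0 = rowI S := by
  apply List.ext_getElem
  · simp [rowTA, rowI]
  · intro i h1 h2
    simp only [rowTA, List.getElem_map, List.getElem_range] at *
    cases i with
    | zero => simp [chiA, rowI]
    | succ i =>
      simp only [rowI, List.getElem_cons_succ]
      rw [List.getElem_replicate]
      show chiA arr (S:Int) 0 ((i+1 : Nat) : Int) = false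
      simp [chiA]
      omega

theorem prow_zero (arr : List Int) (S i : Nat) : prow arr S i 0 = rowI S := by
  apply List.ext_getElem
  · simp [prow, rowI]
  · intro c h1 h2
    simp only [prow, List.getElem_map, List.getElem_range] at *
    cases c with
    | zero => simp [chiA_zero, rowI]
    | succ c =>
      simp only [rowI, List.getElem_cons_succ]
      rw [List.getElem_replicate, if_neg (by omega)]

theorem prow_last (arr : List Int) (S i : Nat) : prow arr S i S = rowTA arr S i := by
  unfold prow rowTA
  refine List.map_congr_left fun c hc => ?_
  rw [List.mem_range] at hc
  rw [if_pos (by omega)]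

-- initial matrix
theorem m0_eq (S N : Nat) :
    ((PySem.List.pyRange 0 ((N:Int)+1) 1).map
      (fun _y => (PySem.List.pyRange 0 ((S:Int)+1) 1).map (fun _x => false)))
    = List.replicate (N+1) (List.replicate (S+1) false) := by
  rw [List.map_const', PySem.List.length_pyRange_one]
  rw [show (((N:Int)+1) - 0).toNat = N+1 by omega]
  congr 1
  rw [List.map_const', PySem.List.length_pyRange_one]
  rw [show (((S:Int)+1) - 0).toNat = S+1 by omega]

-- the column-0 initialisation loop
theorem init_fold (S N : Nat) (k : Nat) (hk : k ≤ N+1) :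
    ((PySem.List.pyRange 0 (k:Int) 1).foldl
      (fun m i => PySem.List.pySetD m i (PySem.List.pySetD (PySem.List.pyGetD m i []) 0 true))
      (List.replicate (N+1) (List.replicate (S+1) false)))
    = List.replicate k (rowI S) ++ List.replicate (N+1-k) (List.replicate (S+1) false) := by
  induction k with
  | zero => simp [PySem.List.pyRange_one_eq_nil]
  | succ k ih =>
    rw [show ((k+1:Nat):Int) = ((k:Nat):Int) + 1 by push_cast; ring,
      show PySem.List.pyRange 0 ((k:Int)+1) 1 = PySem.List.pyRange 0 (k:Int) 1 ++ [(k:Int)] from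
        PySem.List.pyRange_one_succ_right (by omega),
      List.foldl_append, ih (by omega)]
    simp only [List.foldl_cons, List.foldl_nil]
    rw [PySem.List.pyGetD_natCast, PySem.List.pySetD_natCast]
    have hlen : (List.replicate k (rowI S)).length = k := by simp
    rw [show (List.replicate (N+1-k) (List.replicate (S+1) false))
          = List.replicate (S+1) false :: List.replicate (N-k) (List.replicate (S+1) false) by
        rw [← List.replicate_succ]; congr 1; omega]
    rw [getD_append_at _ _ _ _ hlen, set_append_at _ _ _ _ hlen,
      show List.replicate (k+1) (rowI S) = List.replicate k (rowI S) ++ [rowI S] from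
        List.replicate_succ', List.append_assoc]
    congr 1
    simp only [List.getD_cons_zero, List.set_cons_zero, List.singleton_append]
    congr 1
    rw [show ((0:Int)) = ((0:Nat):Int) from rfl, PySem.List.pySetD_natCast]
    rw [show S+1 = Nat.succ S from rfl, List.replicate_succ, List.set_cons_zero]
    rfl
    congr 1
    omega

theorem chiA_succ (arr : List Int) (sum : Int) (m : Nat) (j : Int) (hj : j ≠ 0) :
    chiA arr sum (m+1) j =
      if arr.getD m 0 ≤ j then chiA arr sum m j || chiA arr sum m (j - arr.getD m 0)
      else chiA arr sum m j := by
  rw [show chiA arr sum (m+1) j =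
        (if (j == 0) = true then true
         else if arr.getD m 0 ≤ j then chiA arr sum m j || chiA arr sum m (j - arr.getD m 0)
         else chiA arr sum m j) from rfl,
    if_neg (show ¬ ((j == 0) = true) by simpa using hj)]

theorem prow_set (arr : List Int) (S i1 t : Nat) (ht : t + 1 ≤ S) :
    (prow arr S i1 t).set (t+1) (chiA arr (S:Int) i1 ((t+1:Nat):Int)) = prow arr S i1 (t+1) := by
  unfold prow
  rw [set_map_range _ _ _ _ (by omega)]
  refine List.map_congr_left fun c hc => ?_
  rw [List.mem_range] at hc
  by_cases h1 : c = t+1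
  · subst h1
    rw [if_pos rfl, if_pos (by omega)]
  · rw [if_neg h1]
    by_cases h2 : c ≤ t
    · rw [if_pos h2, if_pos (by omega)]
    · rw [if_neg h2, if_neg (by omega)]

-- one full inner row loop (S ≥ 1 uses nonnegativity of the element; works for any S)
theorem inner_aux (arr : List Int) (S N i1 : Nat) (h1 : 1 ≤ i1) (hN : i1 ≤ N)
    (ha : 0 ≤ arr.getD (i1-1) 0) (t : Nat) (ht : t ≤ S) :
    ((PySem.List.pyRange 1 ((t:Int)+1) 1).foldl
      (fun m j =>
        PySem.List.pySetD m (i1:Int) (PySem.List.pySetD (PySem.List.pyGetD m (i1:Int) []) j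
          (if PySem.List.pyGetD arr ((i1:Int)-1) 0 ≤ j then
            PySem.List.pyGetD (PySem.List.pyGetD m ((i1:Int)-1) []) j false ||
              PySem.List.pyGetD (PySem.List.pyGetD m ((i1:Int)-1) []) (j - PySem.List.pyGetD arr ((i1:Int)-1) 0) false
          else
            PySem.List.pyGetD (PySem.List.pyGetD m ((i1:Int)-1) []) j false)))
      ((List.range i1).map (rowTA arr S) ++ rowI S :: List.replicate (N-i1) (rowI S)))
    = (List.range i1).map (rowTA arr S) ++ prow arr S i1 t :: List.replicate (N-i1) (rowI S) := by
  induction t with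
  | zero =>
    rw [show ((0:Nat):Int)+1 = 1 by norm_num, PySem.List.pyRange_one_eq_nil (le_refl 1)]
    simp only [List.foldl_nil]
    rw [prow_zero]
  | succ t ih =>
    rw [show ((t+1:Nat):Int)+1 = ((t:Nat):Int)+1+1 by push_cast; ring,
      show PySem.List.pyRange 1 (((t:Nat):Int)+1+1) 1
          = PySem.List.pyRange 1 (((t:Nat):Int)+1) 1 ++ [((t:Nat):Int)+1] from
        PySem.List.pyRange_one_succ_right (by omega),
      List.foldl_append, ih (by omega)]
    simp only [List.foldl_cons, List.foldl_nil]
    rw [show ((t:Nat):Int)+1 = ((t+1:Nat):Int) by push_cast; ring,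
      show ((i1:Nat):Int)-1 = ((i1-1:Nat):Int) by omega]
    simp only [PySem.List.pyGetD_natCast, PySem.List.pySetD_natCast]
    have hlen : ((List.range i1).map (rowTA arr S)).length = i1 := by simp
    rw [getD_append_lt _ _ _ (i1-1) (by simp; omega),
      getD_map_range_lt (rowTA arr S) i1 (i1-1) [] (by omega),
      getD_append_at _ _ _ _ hlen, List.getD_cons_zero,
      set_append_at _ _ _ _ hlen, List.set_cons_zero]
    obtain ⟨m, rfl⟩ : ∃ m, i1 = m+1 := ⟨i1-1, by omega⟩
    have hm : m+1-1 = m := by omega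
    rw [hm] at ha ⊢
    have hg1 : (rowTA arr S m).getD (t+1) false = chiA arr (S:Int) m ((t+1:Nat):Int) := by
      unfold rowTA
      rw [getD_map_range_lt _ _ _ _ (by omega)]
    have hv :
        (if arr.getD m 0 ≤ ((t+1:Nat):Int) then
          (rowTA arr S m).getD (t+1) false ||
            PySem.List.pyGetD (rowTA arr S m) (((t+1:Nat):Int) - arr.getD m 0) false
        else (rowTA arr S m).getD (t+1) false)
        = chiA arr (S:Int) (m+1) ((t+1:Nat):Int) := by
      rw [chiA_succ arr (S:Int) m ((t+1:Nat):Int) (by omega)]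
      by_cases hc : arr.getD m 0 ≤ ((t+1:Nat):Int)
      · rw [if_pos hc, if_pos hc, hg1]
        congr 1
        rw [PySem.List.pyGetD_of_nonneg _ _ _]
        unfold rowTA
        rw [getD_map_range_lt _ _ _ _ (by omega)]
        congr 1
        · omega
        · omega
      · rw [if_neg hc, if_neg hc, hg1]
    rw [hv, prow_set arr S (m+1) t ht]

theorem rowTA_S0 (arr : List Int) (i : Nat) : rowTA arr 0 i = rowI 0 := by
  simp [rowTA, rowI, chiA_zero]

theorem cons_middle {α : Type} (l r : List α) (x : α) :
    l ++ x :: r = (l ++ [x]) ++ r := by simp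

theorem inner_step (arr : List Int) (S N i1 : Nat) (h1 : 1 ≤ i1) (hN : i1 ≤ N)
    (ha : 0 ≤ arr.getD (i1-1) 0) :
    ((PySem.List.pyRange 1 ((S:Int)+1) 1).foldl
      (fun m j =>
        PySem.List.pySetD m (i1:Int) (PySem.List.pySetD (PySem.List.pyGetD m (i1:Int) []) j
          (if PySem.List.pyGetD arr ((i1:Int)-1) 0 ≤ j then
            PySem.List.pyGetD (PySem.List.pyGetD m ((i1:Int)-1) []) j false ||
              PySem.List.pyGetD (PySem.List.pyGetD m ((i1:Int)-1) []) (j - PySem.List.pyGetD arr ((i1:Int)-1) 0) false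
          else
            PySem.List.pyGetD (PySem.List.pyGetD m ((i1:Int)-1) []) j false)))
      ((List.range i1).map (rowTA arr S) ++ List.replicate (N+1-i1) (rowI S)))
    = (List.range (i1+1)).map (rowTA arr S) ++ List.replicate (N-i1) (rowI S) := by
  rw [show List.replicate (N+1-i1) (rowI S) = rowI S :: List.replicate (N-i1) (rowI S) by
      rw [← List.replicate_succ]; congr 1; omega,
    inner_aux arr S N i1 h1 hN ha S (le_refl S), prow_last,
    show List.range (i1+1) = List.range i1 ++ [i1] from List.range_succ,
    List.map_append, List.map_singleton, cons_middle]

theorem outer_fold (arr : List Int) (S N : Nat)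
    (hnn : S = 0 ∨ ∀ t, t < N → 0 ≤ arr.getD t 0) (k : Nat) (hk : k ≤ N) :
    ((PySem.List.pyRange 1 ((k:Int)+1) 1).foldl
      (fun m i =>
        (PySem.List.pyRange 1 ((S:Int)+1) 1).foldl
          (fun m j =>
            PySem.List.pySetD m i (PySem.List.pySetD (PySem.List.pyGetD m i []) j
              (if PySem.List.pyGetD arr (i-1) 0 ≤ j then
                PySem.List.pyGetD (PySem.List.pyGetD m (i-1) []) j false ||
                  PySem.List.pyGetD (PySem.List.pyGetD m (i-1) []) (j - PySem.List.pyGetD arr (i-1) 0) false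
              else
                PySem.List.pyGetD (PySem.List.pyGetD m (i-1) []) j false))) m)
      (List.replicate (N+1) (rowI S)))
    = (List.range (k+1)).map (rowTA arr S) ++ List.replicate (N-k) (rowI S) := by
  induction k with
  | zero =>
    rw [show ((0:Nat):Int)+1 = 1 by norm_num, PySem.List.pyRange_one_eq_nil (le_refl 1)]
    simp only [List.foldl_nil, Nat.sub_zero]
    rw [show List.range (0+1) = [0] from rfl, List.map_singleton, rowTA_zero,
      List.replicate_succ]
    rfl
  | succ k ih =>
    rw [show ((k+1:Nat):Int)+1 = ((k:Nat):Int)+1+1 by push_cast; ring,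
      show PySem.List.pyRange 1 (((k:Nat):Int)+1+1) 1
          = PySem.List.pyRange 1 (((k:Nat):Int)+1) 1 ++ [((k:Nat):Int)+1] from
        PySem.List.pyRange_one_succ_right (by omega),
      List.foldl_append, ih (by omega)]
    simp only [List.foldl_cons, List.foldl_nil]
    rw [show ((k:Nat):Int)+1 = ((k+1:Nat):Int) by push_cast; ring]
    rcases hnn with hS0 | hnn
    · subst hS0
      rw [show ((0:Nat):Int)+1 = 1 by norm_num, PySem.List.pyRange_one_eq_nil (le_refl 1)]
      simp only [List.foldl_nil]
      rw [show List.range (k+1+1) = List.range (k+1) ++ [k+1] from List.range_succ,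
        List.map_append, List.map_singleton, rowTA_S0,
        show List.replicate (N-k) (rowI 0) = rowI 0 :: List.replicate (N-(k+1)) (rowI 0) by
          rw [← List.replicate_succ]; congr 1; omega,
        cons_middle]
    · rw [show List.replicate (N-k) (rowI S) = List.replicate (N+1-(k+1)) (rowI S) by
          congr 1; omega]
      exact inner_step arr S N (k+1) (by omega) (by omega)
        (by simpa using hnn k (by omega))

theorem a_closed (arr : List Int) (S N : Nat)
    (hnn : S = 0 ∨ ∀ t, t < N → 0 ≤ arr.getD t 0) :
    solve_subset_sum arr (S:Int) (N:Int)
      = (List.range (N+1)).map (rowTA arr S) := by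
  unfold solve_subset_sum
  simp only []
  rw [m0_eq S N,
    show PySem.List.pyRange 0 ((N:Int)+1) 1 = PySem.List.pyRange 0 (((N+1:Nat):Int)) 1 by
      norm_num,
    init_fold S N (N+1) (le_refl _),
    show N+1-(N+1) = 0 by omega, List.replicate_zero, List.append_nil,
    outer_fold arr S N hnn N (le_refl _),
    show N-N = 0 by omega, List.replicate_zero, List.append_nil]

-- ===== VERDICT (by name: the statement is the Claim_ definition above) =====
theorem take_nonneg_getD (arr : List Int) (N : Nat) (hlenN : N ≤ arr.length)
    (h : ∀ a ∈ arr.take N, 0 ≤ a) (t : Nat) (ht : t < N) : 0 ≤ arr.getD t 0 := by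
  have htl : t < arr.length := by omega
  rw [List.getD_eq_getElem arr 0 htl]
  refine h _ ?_
  have : (arr.take N)[t]'(by simp; omega) = arr[t] := List.getElem_take
  rw [← this]
  exact List.getElem_mem _

theorem solve_subset_sum_spec : Claim_equal_solve_subset_sum := by
  intro arr sum n hdom hpre
  unfold Spec_solve_subset_sum
  rcases hpre with hneg | ⟨hs, hn, hlen, hcase⟩
  · have h1 : PySem.List.pyRange 0 (n+1) 1 = [] := PySem.List.pyRange_one_eq_nil (by omega)
    have h2 : PySem.List.pyRange 1 (n+1) 1 = [] := PySem.List.pyRange_one_eq_nil (by omega)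
    unfold solve_subset_sum solve_subset_sum_alt
    rw [h1, h2]
    simp
  · obtain ⟨N, rfl⟩ : ∃ N : Nat, n = (N:Int) := ⟨n.toNat, by omega⟩
    obtain ⟨S, rfl⟩ : ∃ S : Nat, sum = (S:Int) := ⟨sum.toNat, by omega⟩
    have hnn : S = 0 ∨ ∀ t, t < N → 0 ≤ arr.getD t 0 := by
      rcases hcase with h0 | h
      · left; omega
      · right
        intro t htN
        refine take_nonneg_getD arr N (by omega) ?_ t htN
        simpa using h
    rw [a_closed arr S N hnn, alt_closed arr S N]
    refine List.map_congr_left fun i hi => ?_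
    rw [List.mem_range] at hi
    unfold rowTA
    refine List.map_congr_left fun c hc => ?_
    rw [List.mem_range] at hc
    rcases hnn with h0 | h
    · subst h0
      have hc0 : c = 0 := by omega
      subst hc0
      simpa using chiA_eq_chi_sum0 arr i
    · exact chiA_eq_chi arr (S:Int) i (fun k hk => h k (by omega)) (c:Int) (by omega) (by omega)
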